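-- pv_equiv track=rewrite | github.com/ChangxingJiang/OJ-Practice | LeetCode/双周赛/第 158 场双周赛/LC3572.py | maxSumDistinctTriplet
-- ===== SOURCE A (Python) =====
-- from typing import List
--
-- def maxSumDistinctTriplet(x: List[int], y: List[int]) -> int:
--     n = len(x)
--     count = {}
--     for i in range(n):
--         xx = x[i]
--         yy = y[i]
--         if xx not in count:
--             count[xx] = yy
--         else:
--             count[xx] = max(count[xx], yy)
--     nums = sorted(count.values(), reverse=True)
--     if len(nums) < 3:
--         return -1
--     return sum(nums[:3])
-- ===== SOURCE B (Python) =====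
-- from typing import List
--
-- def maxSumDistinctTriplet(x: List[int], y: List[int]) -> int:
--     seen = set()
--     total = 0
--     taken = 0
--     for xx, yy in sorted(zip(x, y), key=lambda p: -p[1]):
--         if xx not in seen:
--             seen.add(xx)
--             total += yy
--             taken += 1
--             if taken == 3:
--                 return total
--     return -1
-- ===== Notes on version B (the rewrite author's own statement) =====
-- stated objective: alternative
-- what changed: Instead of A's per-key running-max dict followed by sorting the dict values, B sorts the (x,y) pairs once by y descending and greedily walks them, summing the y of the first three distinct x values with an early stop.
import Mathlib
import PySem

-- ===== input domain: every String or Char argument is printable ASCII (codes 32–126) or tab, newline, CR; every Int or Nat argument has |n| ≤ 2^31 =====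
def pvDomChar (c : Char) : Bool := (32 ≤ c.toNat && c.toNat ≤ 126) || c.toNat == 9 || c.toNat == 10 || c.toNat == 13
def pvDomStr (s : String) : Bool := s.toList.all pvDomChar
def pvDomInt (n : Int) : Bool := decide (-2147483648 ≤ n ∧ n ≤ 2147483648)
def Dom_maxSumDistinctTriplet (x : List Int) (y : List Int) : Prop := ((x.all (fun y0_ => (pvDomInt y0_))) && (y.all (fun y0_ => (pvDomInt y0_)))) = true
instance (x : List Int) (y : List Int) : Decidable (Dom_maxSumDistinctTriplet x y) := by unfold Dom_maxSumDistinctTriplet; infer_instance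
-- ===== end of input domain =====

-- B replaces A's per-key-max dict + value sort by one sort of the (x,y) pairs by y
-- descending and a greedy walk taking the first three distinct x values: an alternative
-- single-sort algorithm of similar cost.


-- ===== PORT A =====
-- loop body of A: one dict update with x[i], y[i]; indices i < len(x) are in range,
-- so Python's x[i] / y[i] is List.getD under Pre_ (len(x) ≤ len(y))
def pvStepA (c : PySem.Dict Int Int) (xx yy : Int) : PySem.Dict Int Int :=
  match c.get? xx with
  | none => c.insert xx yy
  | some v => c.insert xx (max v yy)

def maxSumDistinctTriplet (x : List Int) (y : List Int) : Int :=
  let n := x.length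
  let count := (List.range n).foldl
    (fun c i => pvStepA c (x.getD i 0) (y.getD i 0)) PySem.Dict.empty
  let nums := PySem.List.sorted count.values (fun v => v) true
  if nums.length < 3 then -1
  else (nums.take 3).sum

-- ===== PORT B =====
-- B's loop: walk the pairs, take the y of each unseen x, stop at three taken
def pvPickB : List (Int × Int) → PySem.Set Int → Int → Int → Int
  | [], _, _, _ => -1
  | (xx, yy) :: t, seen, total, taken =>
    if xx ∈ seen then pvPickB t seen total taken
    else
      let seen' := PySem.Set.add seen xx
      let total' := total + yy
      let taken' := taken + 1
      if taken' = 3 then total' else pvPickB t seen' total' taken'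

def maxSumDistinctTriplet_alt (x : List Int) (y : List Int) : Int :=
  pvPickB (PySem.List.sorted (x.zip y) (fun p => -p.2) false) PySem.Set.empty 0 0

-- ===== PRECONDITION & SPEC =====
-- Python A raises IndexError at y[i] when len(y) < len(x) (B's zip just truncates there).
def Pre_maxSumDistinctTriplet (x : List Int) (y : List Int) : Prop := x.length ≤ y.length
instance (x : List Int) (y : List Int) : Decidable (Pre_maxSumDistinctTriplet x y) := by
  unfold Pre_maxSumDistinctTriplet; infer_instance

def pvWitness_maxSumDistinctTriplet : List Int × List Int := ([1, 2, 3], [4, 5, 6])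

def Spec_maxSumDistinctTriplet (x : List Int) (y : List Int) (out : Int) : Prop := out = maxSumDistinctTriplet_alt x y
instance (x : List Int) (y : List Int) (out : Int) : Decidable (Spec_maxSumDistinctTriplet x y out) := by unfold Spec_maxSumDistinctTriplet; infer_instance

-- ===== CLAIM (what is proved, stated in full; the proofs are below) =====
def Claim_equal_maxSumDistinctTriplet : Prop := ∀ (x : List Int) (y : List Int), Dom_maxSumDistinctTriplet x y → Pre_maxSumDistinctTriplet x y → Spec_maxSumDistinctTriplet x y (maxSumDistinctTriplet x y)

-- ===== LEMMAS AND PROOFS =====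

-- reading every index of a list back in order gives the list
theorem map_getD_range (xs : List Int) :
    (List.range xs.length).map (fun i => xs.getD i 0) = xs := by
  apply List.ext_getElem
  · simp
  · intro i h1 h2
    simp [List.getD_eq_getElem?_getD, List.getElem?_eq_getElem h2]

-- zip, seen through indices (this is where Pre_ is used)
theorem zip_eq_map_range (x y : List Int) (h : x.length ≤ y.length) :
    x.zip y = (List.range x.length).map (fun i => (x.getD i 0, y.getD i 0)) := by
  apply List.ext_getElem
  · simp [List.length_zip]; omega
  · intro i h1 h2
    have hx : i < x.length := by simpa using h2
    have hy : i < y.length := by omega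
    simp [List.getElem_zip, List.getD_eq_getElem?_getD,
      List.getElem?_eq_getElem hx, List.getElem?_eq_getElem hy]

-- the y-values of the key-k pairs, as B's per-index selection
theorem sel_eq (x y : List Int) (k : Int) :
    ((((List.range x.length).map (fun i => (x.getD i 0, y.getD i 0))).filter
        (fun p => p.1 == k)).map (·.2))
      = ((List.range x.length).filter (fun j => x.getD j 0 == k)).map (fun j => y.getD j 0) := by
  rw [List.filter_map, List.map_map]; rfl

-- Python's running max of an optional accumulator over a list of values
def pvComb (o : Option Int) (ys : List Int) : Option Int :=
  ys.foldl (fun acc v => some (match acc with | some a => max a v | none => v)) o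

theorem pvComb_some (a : Int) (ys : List Int) : pvComb (some a) ys = some (ys.foldl max a) := by
  induction ys generalizing a with
  | nil => rfl
  | cons h t ih => simp [pvComb, List.foldl] at *; exact ih (max a h)

theorem pvComb_perm {l l' : List Int} (h : l.Perm l') (o : Option Int) :
    pvComb o l = pvComb o l' := by
  apply h.foldl_eq' _ o
  intro a _ b _ z
  cases z <;> simp [max_comm, max_left_comm]

-- the final dict lookup is the running max of all values whose key matches
theorem foldA_get? (l : List (Int × Int)) (d : PySem.Dict Int Int) (k : Int) :
    (l.foldl (fun c p => pvStepA c p.1 p.2) d).get? k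
      = pvComb (d.get? k) ((l.filter (fun p => p.1 == k)).map (·.2)) := by
  induction l generalizing d with
  | nil => rfl
  | cons p t ih =>
    rcases p with ⟨a, b⟩
    by_cases hak : a = k
    · subst hak
      simp only [List.foldl_cons, ih, List.filter_cons, beq_self_eq_true, if_pos]
      simp only [pvStepA, List.map_cons]
      cases hg : d.get? a with
      | none => simp [PySem.Dict.get?_insert_self, pvComb]
      | some v => simp [PySem.Dict.get?_insert_self, pvComb]
    · simp only [List.foldl_cons, ih, List.filter_cons]
      rw [if_neg (by simp [hak])]
      congr 1
      simp only [pvStepA]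
      cases hg : d.get? a with
      | none => exact PySem.Dict.get?_insert_of_ne _ _ (fun h => hak h.symm)
      | some v => exact PySem.Dict.get?_insert_of_ne _ _ (fun h => hak h.symm)

-- the step function of A's loop, written as a single insert (for the keys lemmas)
theorem pvStepA_eq_insert (c : PySem.Dict Int Int) (xx yy : Int) :
    pvStepA c xx yy = c.insert xx (match c.get? xx with | none => yy | some v => max v yy) := by
  unfold pvStepA; cases c.get? xx <;> rfl

-- the per-key maximum B's walk realises, named for the proofs
def pvKeyMax (x : List Int) (y : List Int) (k : Int) : Int :=
  match ((List.range x.length).filter (fun j => x.getD j 0 == k)).map (fun j => y.getD j 0) with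
  | [] => 0
  | h :: t => t.foldl max h

-- A's dict, characterised: its values are the per-key maxima over the distinct keys
theorem countA_values (x y : List Int) :
    (((List.range x.length).foldl
        (fun c i => pvStepA c (x.getD i 0) (y.getD i 0)) PySem.Dict.empty).values)
      = (PySem.List.dedup x).map (pvKeyMax x y) := by
  set l := List.range x.length with hl
  have hfold : ∀ (d : PySem.Dict Int Int),
      l.foldl (fun c i => pvStepA c (x.getD i 0) (y.getD i 0)) d
        = (l.map (fun i => (x.getD i 0, y.getD i 0))).foldl (fun c p => pvStepA c p.1 p.2) d := by
    intro d; rw [List.foldl_map]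
  rw [hfold]
  set L := l.map (fun i => (x.getD i 0, y.getD i 0)) with hL
  set D := L.foldl (fun c p => pvStepA c p.1 p.2) PySem.Dict.empty with hD
  have hkeysL : L.map (·.1) = x := by
    rw [hL, List.map_map]
    exact map_getD_range x
  have hkeys : D.keys = PySem.Set.ofList x := by
    rw [hD]
    have : (L.foldl (fun c p => pvStepA c p.1 p.2) PySem.Dict.empty)
        = (L.foldl (fun c p => c.insert p.1
            (match c.get? p.1 with | none => p.2 | some v => max v p.2)) PySem.Dict.empty) := by
      apply PySem.List.foldl_congr_mem
      intro c p _; exact pvStepA_eq_insert c p.1 p.2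
    rw [this, PySem.Dict.keys_foldl_insert_key, hkeysL, PySem.Dict.keys_empty,
        PySem.Set.update_nil_left]
  have hnodup : D.keys.Nodup := by
    rw [hkeys]; exact PySem.Set.nodup_ofList x
  rw [PySem.Dict.values_eq_map_keys D hnodup 0, hkeys]
  rw [PySem.List.dedup_eq_ofList]
  apply List.map_congr_left
  intro k hk
  have hmem : k ∈ x := (PySem.Set.mem_ofList x k).mp hk
  have hsel : (L.filter (fun p => p.1 == k)).map (·.2)
      = ((List.range x.length).filter (fun j => x.getD j 0 == k)).map (fun j => y.getD j 0) := by
    rw [hL, ← hl]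
    exact sel_eq x y k
  have hget : D.get? k = pvComb none ((L.filter (fun p => p.1 == k)).map (·.2)) := by
    rw [hD, foldA_get? L PySem.Dict.empty k, PySem.Dict.get?_empty]
  rw [hsel] at hget
  have hne : ((List.range x.length).filter (fun j => x.getD j 0 == k)).map (fun j => y.getD j 0) ≠ [] := by
    obtain ⟨i, hi, hxi⟩ := List.mem_iff_getElem.mp hmem
    simp only [ne_eq, List.map_eq_nil_iff, List.filter_eq_nil_iff, not_forall]
    exact ⟨i, by simp [List.mem_range, hi], by simp [List.getD_eq_getElem?_getD, List.getElem?_eq_getElem hi, hxi]⟩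
  rw [pvKeyMax]
  cases hys : ((List.range x.length).filter (fun j => x.getD j 0 == k)).map (fun j => y.getD j 0) with
  | nil => exact absurd hys hne
  | cons h t =>
    rw [hys] at hget
    have : pvComb none (h :: t) = some (t.foldl max h) := by
      show pvComb (some h) t = _
      exact pvComb_some h t
    rw [this] at hget
    exact PySem.Dict.getD_of_get?_eq_some _ _ hget

-- the (pair) subsequence B's walk keeps: first occurrence of each unseen key
def pvPick : List (Int × Int) → List Int → List (Int × Int)
  | [], _ => []
  | p :: t, s => if p.1 ∈ s then pvPick t s else p :: pvPick t (PySem.Set.add s p.1)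

theorem pvPick_sublist (l : List (Int × Int)) (s : List Int) : (pvPick l s).Sublist l := by
  induction l generalizing s with
  | nil => simp [pvPick]
  | cons p t ih =>
    by_cases hp : p.1 ∈ s
    · simp only [pvPick, if_pos hp]
      exact (ih s).trans (List.sublist_cons_self p t)
    · simp only [pvPick, if_neg hp]
      exact (ih (PySem.Set.add s p.1)).cons₂ p

theorem mem_keys_pvPick (l : List (Int × Int)) (s : List Int) (k : Int) :
    k ∈ (pvPick l s).map (·.1) ↔ k ∈ l.map (·.1) ∧ k ∉ s := by
  induction l generalizing s with
  | nil => simp [pvPick]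
  | cons p t ih =>
    by_cases hp : p.1 ∈ s
    · simp only [pvPick, if_pos hp, ih, List.map_cons, List.mem_cons]
      constructor
      · rintro ⟨h1, h2⟩; exact ⟨Or.inr h1, h2⟩
      · rintro ⟨h1 | h1, h2⟩
        · exact absurd (h1 ▸ hp) h2
        · exact ⟨h1, h2⟩
    · simp only [pvPick, if_neg hp, List.map_cons, List.mem_cons, ih, PySem.Set.mem_add]
      constructor
      · rintro (rfl | ⟨h1, h2⟩)
        · exact ⟨Or.inl rfl, hp⟩
        · exact ⟨Or.inr h1, fun hs => h2 (Or.inl hs)⟩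
      · rintro ⟨rfl | h1, h2⟩
        · exact Or.inl rfl
        · by_cases hk : k = p.1
          · exact Or.inl hk
          · exact Or.inr ⟨h1, by tauto⟩

theorem nodup_keys_pvPick (l : List (Int × Int)) (s : List Int) :
    ((pvPick l s).map (·.1)).Nodup := by
  induction l generalizing s with
  | nil => simp [pvPick]
  | cons p t ih =>
    by_cases hp : p.1 ∈ s
    · simp only [pvPick, if_pos hp]; exact ih s
    · simp only [pvPick, if_neg hp, List.map_cons, List.nodup_cons]
      refine ⟨fun hmem => ?_, ih _⟩
      have := (mem_keys_pvPick t (PySem.Set.add s p.1) p.1).mp hmem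
      exact this.2 ((PySem.Set.mem_add _ _ _).mpr (Or.inr rfl))

-- a running max over values all ≤ the start stays at the start
theorem foldl_max_of_le (a : Int) (t : List Int) (h : ∀ v ∈ t, v ≤ a) :
    t.foldl max a = a := by
  rcases PySem.List.foldl_max_mem t a with heq | hmem
  · exact heq
  · exact le_antisymm (h _ hmem) (PySem.List.le_foldl_max t a).1

-- in a y-descending pair list, each picked pair carries the max y of its key
theorem pvPick_val (l : List (Int × Int)) (s : List Int)
    (hpw : l.Pairwise (fun p q => q.2 ≤ p.2)) :
    ∀ p ∈ pvPick l s, pvComb none ((l.filter (fun q => q.1 == p.1)).map (·.2)) = some p.2 := by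
  induction l generalizing s with
  | nil => simp [pvPick]
  | cons a t ih =>
    have ha : ∀ q ∈ t, q.2 ≤ a.2 := fun q hq => List.rel_of_pairwise_cons hpw hq
    have ht : t.Pairwise (fun p q => q.2 ≤ p.2) := hpw.of_cons
    intro p hp
    by_cases hps : a.1 ∈ s
    · rw [pvPick, if_pos hps] at hp
      have hne : a.1 ≠ p.1 := by
        intro h
        exact ((mem_keys_pvPick t s p.1).mp (List.mem_map_of_mem hp)).2 (h ▸ hps)
      rw [List.filter_cons, if_neg (by simpa using hne)]
      exact ih s ht p hp
    · rw [pvPick, if_neg hps] at hp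
      rcases List.mem_cons.mp hp with rfl | hp'
      · rw [List.filter_cons, if_pos (by simp)]
        simp only [List.map_cons]
        show pvComb (some p.2) ((t.filter (fun q => q.1 == p.1)).map (·.2)) = some p.2
        rw [pvComb_some]
        congr 1
        apply foldl_max_of_le
        intro v hv
        obtain ⟨q, hq, rfl⟩ := List.mem_map.mp hv
        exact ha q (List.mem_of_mem_filter hq)
      · have hne : a.1 ≠ p.1 := by
          intro h
          exact ((mem_keys_pvPick t (PySem.Set.add s a.1) p.1).mp (List.mem_map_of_mem hp')).2
            ((PySem.Set.mem_add _ _ _).mpr (Or.inr h.symm))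
        rw [List.filter_cons, if_neg (by simpa using hne)]
        exact ih _ ht p hp'

-- B's walk, characterised by the list of picked values
theorem pvPickB_eq (l : List (Int × Int)) :
    ∀ (s : List Int) (total taken : Int), taken = 0 ∨ taken = 1 ∨ taken = 2 →
    pvPickB l s total taken
      = if 3 ≤ taken + ((pvPick l s).length : Int)
        then total + (((pvPick l s).map (·.2)).take (3 - taken).toNat).sum
        else -1 := by
  induction l with
  | nil =>
    intro s total taken htk
    rw [if_neg (by simp [pvPick]; omega)]
    rfl
  | cons p t ih =>
    intro s total taken htk
    rcases p with ⟨xx, yy⟩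
    by_cases hp : xx ∈ s
    · rw [show pvPickB ((xx, yy) :: t) s total taken = pvPickB t s total taken from by
        simp [pvPickB, hp]]
      rw [ih s total taken htk]
      simp [pvPick, hp]
    · have hpick : pvPick ((xx, yy) :: t) s = (xx, yy) :: pvPick t (PySem.Set.add s xx) := by
        simp [pvPick, hp]
      rcases htk with rfl | rfl | rfl
      · rw [show pvPickB ((xx, yy) :: t) s total 0
            = pvPickB t (PySem.Set.add s xx) (total + yy) 1 from by simp [pvPickB, hp]]
        rw [ih _ _ 1 (by omega), hpick]
        simp only [List.length_cons, List.map_cons]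
        rw [show ((3 : Int) - 0).toNat = 2 + 1 from rfl, show ((3 : Int) - 1).toNat = 2 from rfl,
          List.take_succ_cons, List.sum_cons]
        split_ifs with h1 h2 h2
        · ring
        · exfalso; omega
        · exfalso; omega
        · rfl
      · rw [show pvPickB ((xx, yy) :: t) s total 1
            = pvPickB t (PySem.Set.add s xx) (total + yy) 2 from by simp [pvPickB, hp]]
        rw [ih _ _ 2 (by omega), hpick]
        simp only [List.length_cons, List.map_cons]
        rw [show ((3 : Int) - 1).toNat = 1 + 1 from rfl, show ((3 : Int) - 2).toNat = 1 from rfl,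
          List.take_succ_cons, List.sum_cons]
        split_ifs with h1 h2 h2
        · ring
        · exfalso; omega
        · exfalso; omega
        · rfl
      · rw [show pvPickB ((xx, yy) :: t) s total 2 = total + yy from by simp [pvPickB, hp]]
        rw [hpick]
        simp only [List.length_cons, List.map_cons]
        rw [if_pos (by push_cast; omega)]
        rw [show ((3 : Int) - 2).toNat = 0 + 1 from rfl, List.take_succ_cons, List.sum_cons]
        simp

-- ===== VERDICT (by name: the statement is the Claim_ definition above) =====
theorem maxSumDistinctTriplet_spec : Claim_equal_maxSumDistinctTriplet := by
  intro x y _ hpre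
  unfold Spec_maxSumDistinctTriplet maxSumDistinctTriplet maxSumDistinctTriplet_alt
  simp only
  rw [countA_values x y]
  have hzip := zip_eq_map_range x y hpre
  set pairs := PySem.List.sorted (x.zip y) (fun p => -p.2) false with hpairs
  set nums := PySem.List.sorted ((PySem.List.dedup x).map (pvKeyMax x y)) (fun v => v) true
    with hnums
  -- pairs is y-descending
  have hpw : pairs.Pairwise (fun p q => q.2 ≤ p.2) := by
    have := PySem.List.sorted_pairwise (x.zip y) (fun p => -p.2)
    exact this.imp (by intro a b h; omega)
  have hperm : pairs.Perm (x.zip y) := PySem.List.sorted_perm _ _ _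
  -- each picked pair carries the per-key max
  have hval : ∀ p ∈ pvPick pairs PySem.Set.empty, p.2 = pvKeyMax x y p.1 := by
    intro p hp
    have h1 := pvPick_val pairs PySem.Set.empty hpw p hp
    have h2 : ((pairs.filter (fun q => q.1 == p.1)).map (·.2)).Perm
        (((x.zip y).filter (fun q => q.1 == p.1)).map (·.2)) :=
      (hperm.filter _).map _
    rw [pvComb_perm h2 none, hzip, sel_eq x y p.1] at h1
    rw [pvKeyMax]
    cases hys : ((List.range x.length).filter (fun j => x.getD j 0 == p.1)).map
        (fun j => y.getD j 0) with
    | nil => rw [hys] at h1; exact absurd h1 (by simp [pvComb])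
    | cons h t =>
      rw [hys] at h1
      have : pvComb none (h :: t) = some (t.foldl max h) := by
        show pvComb (some h) t = _
        exact pvComb_some h t
      rw [this] at h1
      exact (Option.some_inj.mp h1).symm
  -- the picked values are the distinct keys' maxima, up to order
  have hmemx : ∀ k : Int, k ∈ (x.zip y).map (·.1) ↔ k ∈ x := by
    intro k
    rw [hzip, List.map_map]
    rw [show ((·.1) ∘ fun i => (x.getD i 0, y.getD i 0) : Nat → Int) = fun i => x.getD i 0 from rfl]
    rw [map_getD_range]
  have hkeysperm : ((pvPick pairs PySem.Set.empty).map (·.1)).Perm (PySem.List.dedup x) := by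
    rw [List.perm_ext_iff_of_nodup (nodup_keys_pvPick _ _)
      (PySem.List.nodup_dedup x)]
    intro k
    rw [mem_keys_pvPick, PySem.List.mem_dedup]
    constructor
    · rintro ⟨h1, _⟩
      exact (hmemx k).mp ((hperm.map (·.1)).mem_iff.mp h1)
    · intro h
      exact ⟨(hperm.map (·.1)).mem_iff.mpr ((hmemx k).mpr h), by simp [PySem.Set.empty]⟩
  have hu : (pvPick pairs PySem.Set.empty).map (·.2)
      = ((pvPick pairs PySem.Set.empty).map (·.1)).map (pvKeyMax x y) := by
    rw [List.map_map]
    exact List.map_congr_left (fun p hp => hval p hp)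
  have hvalperm : ((pvPick pairs PySem.Set.empty).map (·.2)).Perm
      ((PySem.List.dedup x).map (pvKeyMax x y)) := by
    rw [hu]; exact hkeysperm.map _
  -- both value lists are descending, hence equal
  have hupw : ((pvPick pairs PySem.Set.empty).map (·.2)).Pairwise (fun a b => b ≤ a) := by
    rw [List.pairwise_map]
    exact List.Pairwise.sublist (pvPick_sublist pairs PySem.Set.empty) hpw
  have hnpw : nums.Pairwise (fun a b => b ≤ a) := by
    have := PySem.List.sorted_pairwise_rev ((PySem.List.dedup x).map (pvKeyMax x y))
      (fun v => v)
    exact this.imp (by intro a b h; exact h)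
  have hueq : (pvPick pairs PySem.Set.empty).map (·.2) = nums := by
    apply PySem.List.eq_of_perm_of_pairwise_le_of_injective (fun v : Int => -v) neg_injective
    · exact hvalperm.trans (PySem.List.sorted_perm _ _ _).symm
    · exact hupw.imp (by intro a b h; omega)
    · exact hnpw.imp (by intro a b h; omega)
  -- assemble both sides
  rw [pvPickB_eq pairs PySem.Set.empty 0 0 (by omega), hueq]
  have hlen : ((pvPick pairs PySem.Set.empty).length : Int) = (nums.length : Int) := by
    rw [← hueq]; simp
  rw [hlen]
  split_ifs with h1 h2 h2
  · omega
  · rfl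
  · rw [show ((3 : Int) - 0).toNat = 3 from rfl]; ring
  · omega
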